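-- pv_equiv track=rewrite | github.com/smearle/script-doctor | puzzlejax/env.py | expand_meta_objs
-- ===== SOURCE A (Python) =====
-- from typing import Callable, Dict, Iterable, List, Optional, Tuple, Union
--
-- def expand_meta_objs(tile_list: List, meta_objs, char_to_obj):
--     assert isinstance(tile_list, list), f"tile_list should be a list, got {type(tile_list)}"
--     expanded_meta_objs = []
--     seen = set()
--     stack = list(tile_list)[::-1]  # So that we start expanding in the right order
--     atomic_obj_names = char_to_obj.values()
--
--     while stack:
--         # Expand depth-first
--         mo = stack.pop(-1)
--         if mo in meta_objs and mo not in seen: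
--             stack.extend(meta_objs[mo])  # defer expanding sub-elements
--             seen.add(mo)  # mark the meta-object as seen
--         elif mo in char_to_obj:
--             obj = char_to_obj[mo]
--             if obj not in seen:
--                 seen.add(obj)
--                 if obj in meta_objs:
--                     stack.extend(meta_objs[obj])
--                 else:
--                     expanded_meta_objs.append(obj)
--         else:
--             if mo not in seen:
--                 seen.add(mo)
--                 expanded_meta_objs.append(mo)
--             # Deals with `background = background or yardline` in Touchdown Heroes
--             elif mo in atomic_obj_names:
--                 expanded_meta_objs.append(mo)
--     expanded_meta_objs = expanded_meta_objs[::-1]  # Reverse to maintain original order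
--     return expanded_meta_objs
-- ===== SOURCE B (Python) =====
-- def expand_meta_objs(tile_list, meta_objs, char_to_obj):
--     assert isinstance(tile_list, list), f"tile_list should be a list, got {type(tile_list)}"
--     expanded = []
--     seen = set()
--     atomic_obj_names = char_to_obj.values()
--
--     def visit(mo):
--         if mo in meta_objs and mo not in seen:
--             seen.add(mo)
--             for c in reversed(meta_objs[mo]):
--                 visit(c)
--         elif mo in char_to_obj:
--             obj = char_to_obj[mo]
--             if obj not in seen:
--                 seen.add(obj)
--                 if obj in meta_objs:
--                     for c in reversed(meta_objs[obj]):
--                         visit(c)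
--                 else:
--                     expanded.append(obj)
--         else:
--             if mo not in seen:
--                 seen.add(mo)
--                 expanded.append(mo)
--             elif mo in atomic_obj_names:
--                 expanded.append(mo)
--
--     for t in tile_list:
--         visit(t)
--     return expanded[::-1]
-- ===== Notes on version B (the rewrite author's own statement) =====
-- stated objective: alternative
-- what changed: Replaces the explicit LIFO work-stack loop with a recursive DFS helper visit() (children recursed in reversed order, seen marked at visit entry) sharing a seen set and an output list — a different decomposition of the same depth-first expansion.
import Mathlib
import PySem

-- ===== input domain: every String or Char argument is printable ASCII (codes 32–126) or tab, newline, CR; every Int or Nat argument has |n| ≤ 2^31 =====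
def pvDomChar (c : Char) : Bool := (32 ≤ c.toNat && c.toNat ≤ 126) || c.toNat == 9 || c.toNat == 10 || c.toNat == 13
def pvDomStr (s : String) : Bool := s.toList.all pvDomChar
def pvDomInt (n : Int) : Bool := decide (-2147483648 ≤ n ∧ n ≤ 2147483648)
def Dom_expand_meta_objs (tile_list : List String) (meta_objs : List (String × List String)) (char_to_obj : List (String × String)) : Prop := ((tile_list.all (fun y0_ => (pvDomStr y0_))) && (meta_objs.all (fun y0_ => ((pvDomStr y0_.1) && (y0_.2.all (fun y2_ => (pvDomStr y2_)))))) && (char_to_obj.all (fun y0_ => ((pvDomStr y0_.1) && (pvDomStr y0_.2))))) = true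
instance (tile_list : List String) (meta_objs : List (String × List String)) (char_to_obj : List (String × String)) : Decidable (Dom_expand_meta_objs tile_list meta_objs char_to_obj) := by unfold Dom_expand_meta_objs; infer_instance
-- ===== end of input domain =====

-- B replaces A's explicit LIFO work-stack loop with a recursive DFS helper (visit); a
-- different decomposition of the same expansion, equal return value, no speed claim.

-- Python dict lookup on an association list (first match); used by both ports.
def pvGet {α : Type} (l : List (String × α)) (k : String) : Option α :=
  (l.find? (fun p => p.1 == k)).map (·.2)

-- weighted sum over meta entries whose key is not yet seen (termination measure helper)
def pvWSum (w : String × List String → Nat) (m : List (String × List String)) (seen : PySem.Set String) : Nat :=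
  ((m.filter (fun p => !(PySem.Set.contains seen p.1))).map w).sum

theorem pvContains_add_self (s : PySem.Set String) (x : String) :
    PySem.Set.contains (PySem.Set.add s x) x = true := by
  rw [PySem.Set.contains_iff]; exact (PySem.Set.mem_add s x x).mpr (Or.inr rfl)

theorem pvContains_add_of (s : PySem.Set String) (x y : String)
    (h : PySem.Set.contains s y = true) :
    PySem.Set.contains (PySem.Set.add s x) y = true := by
  rw [PySem.Set.contains_iff] at h ⊢; exact (PySem.Set.mem_add s x y).mpr (Or.inl h)

theorem pvContains_add_ne (s : PySem.Set String) (x y : String) (hne : y ≠ x) :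
    PySem.Set.contains (PySem.Set.add s x) y = PySem.Set.contains s y := by
  cases hc : PySem.Set.contains s y with
  | true => exact pvContains_add_of s x y hc
  | false =>
    cases hc' : PySem.Set.contains (PySem.Set.add s x) y with
    | false => rfl
    | true =>
      rw [PySem.Set.contains_iff] at hc'
      rcases (PySem.Set.mem_add s x y).mp hc' with h | h
      · rw [← PySem.Set.contains_iff] at h; rw [h] at hc; simp at hc
      · exact absurd h hne

theorem pvFilter_keep (s : PySem.Set String) (p : String × List String)
    (rest : List (String × List String)) (hp : PySem.Set.contains s p.1 = false) :
    (p :: rest).filter (fun q => !(PySem.Set.contains s q.1))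
      = p :: rest.filter (fun q => !(PySem.Set.contains s q.1)) := by
  rw [List.filter_cons, if_pos (by rw [hp]; rfl)]

theorem pvFilter_drop (s : PySem.Set String) (p : String × List String)
    (rest : List (String × List String)) (hp : PySem.Set.contains s p.1 = true) :
    (p :: rest).filter (fun q => !(PySem.Set.contains s q.1))
      = rest.filter (fun q => !(PySem.Set.contains s q.1)) := by
  rw [List.filter_cons, if_neg (by rw [hp]; simp)]

theorem pvWSum_mono_of (w : String × List String → Nat) (m : List (String × List String))
    (s s' : PySem.Set String)
    (h : ∀ y, PySem.Set.contains s y = true → PySem.Set.contains s' y = true) :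
    pvWSum w m s' ≤ pvWSum w m s := by
  induction m with
  | nil => simp [pvWSum]
  | cons p rest ih =>
    cases hs' : PySem.Set.contains s' p.1 with
    | true =>
      cases hs : PySem.Set.contains s p.1 with
      | true =>
        simp only [pvWSum, pvFilter_drop s' p rest hs', pvFilter_drop s p rest hs]
        exact ih
      | false =>
        simp only [pvWSum, pvFilter_drop s' p rest hs', pvFilter_keep s p rest hs,
          List.map_cons, List.sum_cons]
        simp only [pvWSum] at ih
        omega
    | false =>
      have hs : PySem.Set.contains s p.1 = false := by
        cases hc : PySem.Set.contains s p.1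
        · rfl
        · rw [h p.1 hc] at hs'; exact hs'
      simp only [pvWSum, pvFilter_keep s' p rest hs', pvFilter_keep s p rest hs,
        List.map_cons, List.sum_cons]
      simp only [pvWSum] at ih
      omega

theorem pvWSum_add_le (w : String × List String → Nat) (m : List (String × List String))
    (seen : PySem.Set String) (x : String) :
    pvWSum w m (PySem.Set.add seen x) ≤ pvWSum w m seen :=
  pvWSum_mono_of w m seen _ (fun y hy => pvContains_add_of seen x y hy)

theorem pvWSum_strict (w : String × List String → Nat) (m : List (String × List String))
    (seen : PySem.Set String) (x : String) (c : List String)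
    (hs : PySem.Set.contains seen x = false) (hm : pvGet m x = some c) :
    pvWSum w m (PySem.Set.add seen x) + w (x, c) ≤ pvWSum w m seen := by
  induction m with
  | nil => simp [pvGet] at hm
  | cons p rest ih =>
    obtain ⟨k, v⟩ := p
    by_cases hkx : k = x
    · subst hkx
      have hc : v = c := by simpa [pvGet, List.find?] using hm
      subst hc
      simp only [pvWSum,
        pvFilter_drop (PySem.Set.add seen k) (k, v) rest (pvContains_add_self seen k),
        pvFilter_keep seen (k, v) rest hs, List.map_cons, List.sum_cons]
      have := pvWSum_add_le w rest seen k
      simp only [pvWSum] at this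
      omega
    · have hm' : pvGet rest x = some c := by
        have hb : (k == x) = false := by simp [hkx]
        simpa [pvGet, List.find?, hb] using hm
      have hcp : PySem.Set.contains (PySem.Set.add seen x) k = PySem.Set.contains seen k :=
        pvContains_add_ne seen x k hkx
      have hih := ih hm'
      cases hck : PySem.Set.contains seen k with
      | true =>
        simp only [pvWSum, pvFilter_drop seen (k, v) rest hck,
          pvFilter_drop (PySem.Set.add seen x) (k, v) rest (by rw [hcp, hck])]
        exact hih
      | false =>
        simp only [pvWSum, pvFilter_keep seen (k, v) rest hck,
          pvFilter_keep (PySem.Set.add seen x) (k, v) rest (by rw [hcp, hck]),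
          List.map_cons, List.sum_cons]
        simp only [pvWSum] at hih
        omega

-- ===== PORT A =====
-- A's while-loop over an explicit stack (head = top of stack).  Terminates because each
-- iteration either pops, or moves an unseen meta key into `seen` while pushing its children.
def pvLoopA (meta_objs : List (String × List String)) (char_to_obj : List (String × String))
    (stack acc : List String) (seen : PySem.Set String) : List String :=
  match stack with
  | [] => acc
  | mo :: rest =>
    if hms : (pvGet meta_objs mo).isSome ∧ PySem.Set.contains seen mo = false then
      -- meta-object not yet seen: defer expanding sub-elements
      pvLoopA meta_objs char_to_obj (((pvGet meta_objs mo).getD []).reverse ++ rest) acc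
        (PySem.Set.add seen mo)
    else if hco : (pvGet char_to_obj mo).isSome then
      if hso : PySem.Set.contains seen ((pvGet char_to_obj mo).getD "") = true then
        pvLoopA meta_objs char_to_obj rest acc seen
      else if hmo : (pvGet meta_objs ((pvGet char_to_obj mo).getD "")).isSome then
        pvLoopA meta_objs char_to_obj
          (((pvGet meta_objs ((pvGet char_to_obj mo).getD "")).getD []).reverse ++ rest) acc
          (PySem.Set.add seen ((pvGet char_to_obj mo).getD ""))
      else
        pvLoopA meta_objs char_to_obj rest (acc ++ [(pvGet char_to_obj mo).getD ""])
          (PySem.Set.add seen ((pvGet char_to_obj mo).getD ""))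
    else if PySem.Set.contains seen mo = true then
      if (char_to_obj.map (·.2)).contains mo then
        pvLoopA meta_objs char_to_obj rest (acc ++ [mo]) seen
      else
        pvLoopA meta_objs char_to_obj rest acc seen
    else
      pvLoopA meta_objs char_to_obj rest (acc ++ [mo]) (PySem.Set.add seen mo)
  termination_by stack.length + pvWSum (fun p => p.2.length + 1) meta_objs seen
  decreasing_by
  · obtain ⟨cc, hpm⟩ := Option.isSome_iff_exists.mp hms.1
    have hgd : (pvGet meta_objs mo).getD [] = cc := by rw [hpm]; rfl
    have h1 := pvWSum_strict (fun p => p.2.length + 1) meta_objs seen mo cc hms.2 hpm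
    simp only [hgd, List.length_append, List.length_reverse, List.length_cons] at *
    omega
  · simp only [List.length_cons]
    have := pvWSum_add_le (fun p => p.2.length + 1) meta_objs seen ((pvGet char_to_obj mo).getD "")
    omega
  · obtain ⟨cc, hpm⟩ := Option.isSome_iff_exists.mp hmo
    have hgd : (pvGet meta_objs ((pvGet char_to_obj mo).getD "")).getD [] = cc := by rw [hpm]; rfl
    have h1 := pvWSum_strict (fun p => p.2.length + 1) meta_objs seen
      ((pvGet char_to_obj mo).getD "") cc (by simpa using hso) hpm
    simp only [hgd, List.length_append, List.length_reverse, List.length_cons] at *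
    omega
  · have := pvWSum_add_le (fun p => p.2.length + 1) meta_objs seen ((pvGet char_to_obj mo).getD "")
    simp only [List.length_cons]
    omega
  · simp only [List.length_cons]; omega
  · simp only [List.length_cons]; omega
  · have := pvWSum_add_le (fun p => p.2.length + 1) meta_objs seen mo
    simp only [List.length_cons]
    omega

def expand_meta_objs (tile_list : List String) (meta_objs : List (String × List String)) (char_to_obj : List (String × String)) : List String :=
  (pvLoopA meta_objs char_to_obj tile_list [] ([] : PySem.Set String)).reverse

-- ===== PORT B =====
-- recursive DFS: pvVisit handles one tile (children recursed in reversed order, `seen`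
-- marked at entry), pvVisitList folds pvVisit over a list.  The fuel argument is a
-- totality guard only: it is decremented once per nesting level and never runs out at
-- the chosen initial value (each nesting level consumes an unseen meta key).
mutual
def pvVisit (meta_objs : List (String × List String)) (char_to_obj : List (String × String)) :
    Nat → String → List String × PySem.Set String → List String × PySem.Set String
  | 0, _, st => st
  | f + 1, mo, (acc, seen) =>
    match pvGet meta_objs mo, PySem.Set.contains seen mo with
    | some c, false =>
      pvVisitList meta_objs char_to_obj f c.reverse (acc, PySem.Set.add seen mo)
    | _, _ =>
      match pvGet char_to_obj mo with
      | some obj =>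
        if PySem.Set.contains seen obj = true then (acc, seen)
        else
          match pvGet meta_objs obj with
          | some c => pvVisitList meta_objs char_to_obj f c.reverse (acc, PySem.Set.add seen obj)
          | none => (acc ++ [obj], PySem.Set.add seen obj)
      | none =>
        if PySem.Set.contains seen mo = true then
          if (char_to_obj.map (·.2)).contains mo then (acc ++ [mo], seen) else (acc, seen)
        else (acc ++ [mo], PySem.Set.add seen mo)
termination_by f _ _ => (f, 0)

def pvVisitList (meta_objs : List (String × List String)) (char_to_obj : List (String × String)) :
    Nat → List String → List String × PySem.Set String → List String × PySem.Set String
  | _, [], st => st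
  | f, mo :: rest, st =>
    pvVisitList meta_objs char_to_obj f rest (pvVisit meta_objs char_to_obj f mo st)
termination_by f xs _ => (f, xs.length + 1)
end

def expand_meta_objs_alt (tile_list : List String) (meta_objs : List (String × List String)) (char_to_obj : List (String × String)) : List String :=
  (pvVisitList meta_objs char_to_obj (meta_objs.length + char_to_obj.length + 1) tile_list
    ([], ([] : PySem.Set String))).1.reverse

-- ===== PRECONDITION & SPEC =====
def Spec_expand_meta_objs (tile_list : List String) (meta_objs : List (String × List String)) (char_to_obj : List (String × String)) (out : List String) : Prop := out = expand_meta_objs_alt tile_list meta_objs char_to_obj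
instance (tile_list : List String) (meta_objs : List (String × List String)) (char_to_obj : List (String × String)) (out : List String) : Decidable (Spec_expand_meta_objs tile_list meta_objs char_to_obj out) := by unfold Spec_expand_meta_objs; infer_instance

-- ===== CLAIM (what is proved, stated in full; the proofs are below) =====
def Claim_equal_expand_meta_objs : Prop := ∀ (tile_list : List String) (meta_objs : List (String × List String)) (char_to_obj : List (String × String)), Dom_expand_meta_objs tile_list meta_objs char_to_obj → Spec_expand_meta_objs tile_list meta_objs char_to_obj (expand_meta_objs tile_list meta_objs char_to_obj)

-- ===== LEMMAS AND PROOFS =====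

-- number of meta entries whose key is unseen: bounds the recursion depth of pvVisit
def pvUK (m : List (String × List String)) (seen : PySem.Set String) : Nat :=
  pvWSum (fun _ => 1) m seen

theorem pvUK_add_le (m : List (String × List String)) (seen : PySem.Set String) (x : String) :
    pvUK m (PySem.Set.add seen x) ≤ pvUK m seen :=
  pvWSum_add_le _ m seen x

theorem pvUK_add_lt (m : List (String × List String)) (seen : PySem.Set String) (x : String)
    (c : List String) (hs : PySem.Set.contains seen x = false) (hm : pvGet m x = some c) :
    pvUK m (PySem.Set.add seen x) < pvUK m seen := by
  have h2 : pvWSum (fun _ => 1) m (PySem.Set.add seen x) + 1 ≤ pvWSum (fun _ => 1) m seen :=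
    pvWSum_strict (fun _ => 1) m seen x c hs hm
  simp only [pvUK]
  omega

-- `seen` only grows through pvVisit / pvVisitList
theorem pvVisit_contains_mono (m : List (String × List String)) (c : List (String × String)) :
    ∀ f, (∀ mo acc seen y, PySem.Set.contains seen y = true →
            PySem.Set.contains (pvVisit m c f mo (acc, seen)).2 y = true)
       ∧ (∀ xs st y, PySem.Set.contains st.2 y = true →
            PySem.Set.contains (pvVisitList m c f xs st).2 y = true) := by
  intro f
  induction f using Nat.strong_induction_on with
  | _ f IH =>
    have V : ∀ mo acc seen y, PySem.Set.contains seen y = true →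
        PySem.Set.contains (pvVisit m c f mo (acc, seen)).2 y = true := by
      intro mo acc seen y hy
      cases f with
      | zero => simpa [pvVisit] using hy
      | succ f' =>
        cases hpm : pvGet m mo with
        | some cc =>
          cases hcs : PySem.Set.contains seen mo with
          | false =>
            simp only [pvVisit, hpm, hcs]
            exact (IH f' (Nat.lt_succ_self f')).2 cc.reverse (acc, PySem.Set.add seen mo) y
              (pvContains_add_of seen mo y hy)
          | true =>
            simp only [pvVisit, hpm, hcs]
            cases ho : pvGet c mo with
            | some obj =>
              simp only [ho]
              by_cases hso : PySem.Set.contains seen obj = true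
              · rw [if_pos hso]; exact hy
              · rw [if_neg hso]
                
                cases hmo : pvGet m obj with
                | some cc2 =>
                  simp only [hmo]
                  exact (IH f' (Nat.lt_succ_self f')).2 cc2.reverse (acc, PySem.Set.add seen obj) y
                    (pvContains_add_of seen obj y hy)
                | none =>
                  simp only [hmo]
                  exact pvContains_add_of seen obj y hy
            | none =>
              simp only [ho]
              split
              · split
                · exact hy
                · exact hy
              · exact pvContains_add_of seen mo y hy
        | none =>
          cases hcs : PySem.Set.contains seen mo with
          | false =>
            simp only [pvVisit, hpm, hcs]
            cases ho : pvGet c mo with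
            | some obj =>
              simp only [ho]
              by_cases hso : PySem.Set.contains seen obj = true
              · rw [if_pos hso]; exact hy
              · rw [if_neg hso]
                
                cases hmo : pvGet m obj with
                | some cc2 =>
                  simp only [hmo]
                  exact (IH f' (Nat.lt_succ_self f')).2 cc2.reverse (acc, PySem.Set.add seen obj) y
                    (pvContains_add_of seen obj y hy)
                | none =>
                  simp only [hmo]
                  exact pvContains_add_of seen obj y hy
            | none =>
              simp only [ho]
              split
              · split
                · exact hy
                · exact hy
              · exact pvContains_add_of seen mo y hy
          | true =>
            simp only [pvVisit, hpm, hcs]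
            cases ho : pvGet c mo with
            | some obj =>
              simp only [ho]
              by_cases hso : PySem.Set.contains seen obj = true
              · rw [if_pos hso]; exact hy
              · rw [if_neg hso]
                
                cases hmo : pvGet m obj with
                | some cc2 =>
                  simp only [hmo]
                  exact (IH f' (Nat.lt_succ_self f')).2 cc2.reverse (acc, PySem.Set.add seen obj) y
                    (pvContains_add_of seen obj y hy)
                | none =>
                  simp only [hmo]
                  exact pvContains_add_of seen obj y hy
            | none =>
              simp only [ho]
              split
              · split
                · exact hy
                · exact hy
              · exact pvContains_add_of seen mo y hy
    have L : ∀ xs st y, PySem.Set.contains st.2 y = true →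
        PySem.Set.contains (pvVisitList m c f xs st).2 y = true := by
      intro xs
      induction xs with
      | nil =>
        intro st y hy
        simpa [pvVisitList] using hy
      | cons x rest ih =>
        intro st y hy
        obtain ⟨acc, seen⟩ := st
        simp only [pvVisitList]
        exact ih (pvVisit m c f x (acc, seen)) y (V x acc seen y hy)
    exact ⟨V, L⟩

theorem pvVisit_uk_le (m : List (String × List String)) (c : List (String × String))
    (f : Nat) (mo : String) (acc : List String) (seen : PySem.Set String) :
    pvUK m (pvVisit m c f mo (acc, seen)).2 ≤ pvUK m seen :=
  pvWSum_mono_of _ m seen _ (fun y hy => (pvVisit_contains_mono m c f).1 mo acc seen y hy)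

-- fuel irrelevance above the threshold pvUK
theorem pvVisit_fuel_congr (m : List (String × List String)) (c : List (String × String)) :
    ∀ f, (∀ g mo acc seen, pvUK m seen < f → pvUK m seen < g →
            pvVisit m c f mo (acc, seen) = pvVisit m c g mo (acc, seen))
       ∧ (∀ g xs acc seen, pvUK m seen < f → pvUK m seen < g →
            pvVisitList m c f xs (acc, seen) = pvVisitList m c g xs (acc, seen)) := by
  intro f
  induction f using Nat.strong_induction_on with
  | _ f IH =>
    have V : ∀ g mo acc seen, pvUK m seen < f → pvUK m seen < g →
        pvVisit m c f mo (acc, seen) = pvVisit m c g mo (acc, seen) := by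
      intro g mo acc seen hf hg
      cases f with
      | zero => omega
      | succ f' =>
        cases g with
        | zero => omega
        | succ g' =>
          cases hpm : pvGet m mo with
          | some cc =>
            cases hcs : PySem.Set.contains seen mo with
            | false =>
              simp only [pvVisit, hpm, hcs]
              have hlt := pvUK_add_lt m seen mo cc hcs hpm
              exact (IH f' (Nat.lt_succ_self f')).2 g' cc.reverse acc (PySem.Set.add seen mo)
                (by omega) (by omega)
            | true =>
              simp only [pvVisit, hpm, hcs]
              cases ho : pvGet c mo with
              | some obj =>
                simp only [ho]
                by_cases hso : PySem.Set.contains seen obj = true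
                · rw [if_pos hso, if_pos hso]
                · rw [if_neg hso, if_neg hso]
                  cases hmo : pvGet m obj with
                  | some cc2 =>
                    simp only [hmo]
                    have hlt := pvUK_add_lt m seen obj cc2 (by simpa using hso) hmo
                    exact (IH f' (Nat.lt_succ_self f')).2 g' cc2.reverse acc (PySem.Set.add seen obj)
                      (by omega) (by omega)
                  | none => simp only [hmo]
              | none => simp only [ho]
          | none =>
            cases hcs : PySem.Set.contains seen mo with
            | false =>
              simp only [pvVisit, hpm, hcs]
              cases ho : pvGet c mo with
              | some obj =>
                simp only [ho]
                by_cases hso : PySem.Set.contains seen obj = true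
                · rw [if_pos hso, if_pos hso]
                · rw [if_neg hso, if_neg hso]
                  cases hmo : pvGet m obj with
                  | some cc2 =>
                    simp only [hmo]
                    have hlt := pvUK_add_lt m seen obj cc2 (by simpa using hso) hmo
                    exact (IH f' (Nat.lt_succ_self f')).2 g' cc2.reverse acc (PySem.Set.add seen obj)
                      (by omega) (by omega)
                  | none => simp only [hmo]
              | none => simp only [ho]
            | true =>
              simp only [pvVisit, hpm, hcs]
              cases ho : pvGet c mo with
              | some obj =>
                simp only [ho]
                by_cases hso : PySem.Set.contains seen obj = true
                · rw [if_pos hso, if_pos hso]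
                · rw [if_neg hso, if_neg hso]
                  cases hmo : pvGet m obj with
                  | some cc2 =>
                    simp only [hmo]
                    have hlt := pvUK_add_lt m seen obj cc2 (by simpa using hso) hmo
                    exact (IH f' (Nat.lt_succ_self f')).2 g' cc2.reverse acc (PySem.Set.add seen obj)
                      (by omega) (by omega)
                  | none => simp only [hmo]
              | none => simp only [ho]
    have L : ∀ g xs acc seen, pvUK m seen < f → pvUK m seen < g →
        pvVisitList m c f xs (acc, seen) = pvVisitList m c g xs (acc, seen) := by
      intro g xs
      induction xs with
      | nil => intro acc seen hf hg; simp [pvVisitList]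
      | cons x rest ih =>
        intro acc seen hf hg
        simp only [pvVisitList]
        rw [← V g x acc seen hf hg]
        have hle := pvVisit_uk_le m c f x acc seen
        have h := ih (pvVisit m c f x (acc, seen)).1 (pvVisit m c f x (acc, seen)).2
          (by omega) (by omega)
        simpa using h
    exact ⟨V, L⟩

theorem pvVisitList_append (m : List (String × List String)) (c : List (String × String))
    (f : Nat) (a b : List String) (st : List String × PySem.Set String) :
    pvVisitList m c f (a ++ b) st = pvVisitList m c f b (pvVisitList m c f a st) := by
  induction a generalizing st with
  | nil => simp [pvVisitList]
  | cons x rest ih => simp only [List.cons_append, pvVisitList, ih]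

theorem pvNotSome {α : Type} (o : Option α) (h : ¬ o.isSome = true) : o = none := by
  cases o with
  | none => rfl
  | some x => simp at h

-- the stack loop equals the recursive DFS, given enough fuel
theorem pvLoopA_eq_visitList (m : List (String × List String)) (c : List (String × String)) :
    ∀ stack acc seen f, pvUK m seen < f →
      pvLoopA m c stack acc seen = (pvVisitList m c f stack (acc, seen)).1 := by
  intro stack acc seen
  induction stack, acc, seen using pvLoopA.induct m c with
  | case1 acc seen =>
    intro f hf
    cases f with
    | zero => omega
    | succ g => simp [pvLoopA, pvVisitList]
  | case2 acc seen mo rest hms IH =>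
    intro f hf
    obtain ⟨g, rfl⟩ : ∃ g, f = g + 1 := ⟨f - 1, by omega⟩
    obtain ⟨cc, hpm⟩ := Option.isSome_iff_exists.mp hms.1
    have hgd : (pvGet m mo).getD [] = cc := by rw [hpm]; rfl
    have hlt := pvUK_add_lt m seen mo cc hms.2 hpm
    have hle := pvUK_add_le m seen mo
    simp only [pvLoopA]
    rw [dif_pos hms]
    rw [hgd] at IH ⊢
    rw [IH (g + 1) (by omega), pvVisitList_append]
    simp only [pvVisitList]
    have hv : pvVisit m c (g + 1) mo (acc, seen)
        = pvVisitList m c g cc.reverse (acc, PySem.Set.add seen mo) := by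
      simp only [pvVisit, hpm, hms.2]
    rw [hv, (pvVisit_fuel_congr m c (g + 1)).2 g cc.reverse acc (PySem.Set.add seen mo)
      (by omega) (by omega)]
  | case3 acc seen mo rest hms hco hso IH =>
    intro f hf
    obtain ⟨g, rfl⟩ : ∃ g, f = g + 1 := ⟨f - 1, by omega⟩
    obtain ⟨obj, hobj⟩ := Option.isSome_iff_exists.mp hco
    have hso' : PySem.Set.contains seen obj = true := by
      have := hso; rw [hobj] at this; simpa using this
    have hv : pvVisit m c (g + 1) mo (acc, seen) = (acc, seen) := by
      cases hpm : pvGet m mo with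
      | some cc =>
        have hcs : PySem.Set.contains seen mo = true := by
          cases h : PySem.Set.contains seen mo
          · exact absurd ⟨by rw [hpm]; rfl, h⟩ hms
          · rfl
        simp only [pvVisit, hpm, hcs, hobj]
        rw [if_pos hso']
      | none =>
        simp only [pvVisit, hpm, hobj]
        rw [if_pos hso']
    simp only [pvLoopA]
    rw [dif_neg hms, dif_pos hco, dif_pos hso]
    rw [IH (g + 1) hf]
    simp only [pvVisitList, hv]
  | case4 acc seen mo rest hms hco hso hmo IH =>
    intro f hf
    obtain ⟨g, rfl⟩ : ∃ g, f = g + 1 := ⟨f - 1, by omega⟩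
    obtain ⟨obj, hobj⟩ := Option.isSome_iff_exists.mp hco
    obtain ⟨cc, hpmo⟩ := Option.isSome_iff_exists.mp (show (pvGet m obj).isSome = true by
      rw [hobj] at hmo; simpa using hmo)
    have hso' : PySem.Set.contains seen obj = false := by
      have := hso; rw [hobj] at this; simp at this; simpa using this
    have hgd : (pvGet m ((pvGet c mo).getD "")).getD [] = cc := by
      rw [hobj]; simp only [Option.getD_some]; rw [hpmo]; rfl
    have hlt := pvUK_add_lt m seen obj cc hso' hpmo
    have hle := pvUK_add_le m seen obj
    have hv : pvVisit m c (g + 1) mo (acc, seen)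
        = pvVisitList m c g cc.reverse (acc, PySem.Set.add seen obj) := by
      cases hpm : pvGet m mo with
      | some cc2 =>
        have hcs : PySem.Set.contains seen mo = true := by
          cases h : PySem.Set.contains seen mo
          · exact absurd ⟨by rw [hpm]; rfl, h⟩ hms
          · rfl
        simp only [pvVisit, hpm, hcs, hobj]
        rw [if_neg (by rw [hso']; simp : ¬ PySem.Set.contains seen obj = true)]
        simp only [hpmo]
      | none =>
        simp only [pvVisit, hpm, hobj]
        rw [if_neg (by rw [hso']; simp : ¬ PySem.Set.contains seen obj = true)]
        simp only [hpmo]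
    simp only [pvLoopA]
    rw [dif_neg hms, dif_pos hco, dif_neg hso, dif_pos hmo]
    rw [hgd] at IH ⊢
    have hob : (pvGet c mo).getD "" = obj := by rw [hobj]; rfl
    rw [hob] at IH ⊢
    rw [IH (g + 1) (by omega), pvVisitList_append]
    simp only [pvVisitList, hv]
    rw [(pvVisit_fuel_congr m c (g + 1)).2 g cc.reverse acc (PySem.Set.add seen obj)
      (by omega) (by omega)]
  | case5 acc seen mo rest hms hco hso hmo IH =>
    intro f hf
    obtain ⟨g, rfl⟩ : ∃ g, f = g + 1 := ⟨f - 1, by omega⟩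
    obtain ⟨obj, hobj⟩ := Option.isSome_iff_exists.mp hco
    have hso' : PySem.Set.contains seen obj = false := by
      have := hso; rw [hobj] at this; simp at this; simpa using this
    have hpmo : pvGet m obj = none := by
      refine pvNotSome _ ?_
      rw [hobj] at hmo; simpa using hmo
    have hle := pvUK_add_le m seen obj
    have hv : pvVisit m c (g + 1) mo (acc, seen)
        = (acc ++ [obj], PySem.Set.add seen obj) := by
      cases hpm : pvGet m mo with
      | some cc2 =>
        have hcs : PySem.Set.contains seen mo = true := by
          cases h : PySem.Set.contains seen mo
          · exact absurd ⟨by rw [hpm]; rfl, h⟩ hms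
          · rfl
        simp only [pvVisit, hpm, hcs, hobj]
        rw [if_neg (by rw [hso']; simp : ¬ PySem.Set.contains seen obj = true)]
        simp only [hpmo]
      | none =>
        simp only [pvVisit, hpm, hobj]
        rw [if_neg (by rw [hso']; simp : ¬ PySem.Set.contains seen obj = true)]
        simp only [hpmo]
    simp only [pvLoopA]
    rw [dif_neg hms, dif_pos hco, dif_neg hso, dif_neg hmo]
    have hob : (pvGet c mo).getD "" = obj := by rw [hobj]; rfl
    rw [hob] at IH ⊢
    rw [IH (g + 1) (by omega)]
    simp only [pvVisitList, hv]
  | case6 acc seen mo rest hms hco hsm hat IH =>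
    intro f hf
    obtain ⟨g, rfl⟩ : ∃ g, f = g + 1 := ⟨f - 1, by omega⟩
    have hpc : pvGet c mo = none := pvNotSome _ hco
    have hat' : (c.map (·.2)).contains mo = true := by simpa using hat
    have hv : pvVisit m c (g + 1) mo (acc, seen) = (acc ++ [mo], seen) := by
      cases hpm : pvGet m mo with
      | some cc2 =>
        simp only [pvVisit, hpm, hsm, hpc, if_true]
        rw [if_pos hat']
      | none =>
        simp only [pvVisit, hpm, hpc]
        rw [if_pos hsm, if_pos hat']
    simp only [pvLoopA]
    rw [dif_neg hms, dif_neg hco, if_pos hsm, if_pos hat']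
    rw [IH (g + 1) hf]
    simp only [pvVisitList, hv]
  | case7 acc seen mo rest hms hco hsm hat IH =>
    intro f hf
    obtain ⟨g, rfl⟩ : ∃ g, f = g + 1 := ⟨f - 1, by omega⟩
    have hpc : pvGet c mo = none := pvNotSome _ hco
    have hat' : ¬ (c.map (·.2)).contains mo = true := by simpa using hat
    have hv : pvVisit m c (g + 1) mo (acc, seen) = (acc, seen) := by
      cases hpm : pvGet m mo with
      | some cc2 =>
        simp only [pvVisit, hpm, hsm, hpc, if_true]
        rw [if_neg hat']
      | none =>
        simp only [pvVisit, hpm, hpc]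
        rw [if_pos hsm, if_neg hat']
    simp only [pvLoopA]
    rw [dif_neg hms, dif_neg hco, if_pos hsm, if_neg hat']
    rw [IH (g + 1) hf]
    simp only [pvVisitList, hv]
  | case8 acc seen mo rest hms hco hsm IH =>
    intro f hf
    obtain ⟨g, rfl⟩ : ∃ g, f = g + 1 := ⟨f - 1, by omega⟩
    have hpc : pvGet c mo = none := pvNotSome _ hco
    have hsf : PySem.Set.contains seen mo = false := by
      cases h : PySem.Set.contains seen mo
      · rfl
      · exact absurd h hsm
    have hpm : pvGet m mo = none := by
      cases hpm : pvGet m mo with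
      | some cc2 => exact absurd ⟨by rw [hpm]; rfl, hsf⟩ hms
      | none => rfl
    have hle := pvUK_add_le m seen mo
    have hv : pvVisit m c (g + 1) mo (acc, seen)
        = (acc ++ [mo], PySem.Set.add seen mo) := by
      simp only [pvVisit, hpm, hpc]
      rw [if_neg hsm]
    simp only [pvLoopA]
    rw [dif_neg hms, dif_neg hco, if_neg hsm]
    rw [IH (g + 1) (by omega)]
    simp only [pvVisitList, hv]

theorem pvUK_le_length (m : List (String × List String)) (seen : PySem.Set String) :
    pvUK m seen ≤ m.length := by
  induction m with
  | nil => simp [pvUK, pvWSum]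
  | cons p rest ih =>
    cases hc : PySem.Set.contains seen p.1 with
    | true =>
      simp only [pvUK, pvWSum, pvFilter_drop seen p rest hc, List.length_cons] at *
      omega
    | false =>
      simp only [pvUK, pvWSum, pvFilter_keep seen p rest hc, List.map_cons, List.sum_cons,
        List.length_cons] at *
      omega

-- ===== VERDICT (by name: the statement is the Claim_ definition above) =====
theorem expand_meta_objs_spec : Claim_equal_expand_meta_objs := by
  intro tl m c _
  unfold Spec_expand_meta_objs expand_meta_objs expand_meta_objs_alt
  have hf : pvUK m ([] : PySem.Set String) < m.length + c.length + 1 := by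
    have := pvUK_le_length m ([] : PySem.Set String)
    omega
  rw [pvLoopA_eq_visitList m c tl [] ([] : PySem.Set String) (m.length + c.length + 1) hf]
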